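-- pv_equiv track=rewrite | github.com/homosapien-lcy/turbo_write_app_and_database | turbo_write/server/pythonSubServer/python_utils/tagAnalysisUtils.py | divideNPLeaves
-- ===== SOURCE A (Python) =====
-- def divideNPLeaves(NP_leaves):
--     divided_lists = []
--     each_list = []
--     for i in range(0, len(NP_leaves)):
--         leaf = NP_leaves[i]
--         # if 'CC' or 'IN', divide list
--         if leaf[1] == 'CC' or leaf[1] == 'IN':
--             # if not empty, add to list
--             if len(each_list) > 0:
--                 divided_lists.append(each_list)
--
--             # clear the list
--             each_list = []
--         # for other words, add to output
--         else:
--             each_list.append(leaf)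
--
--     # append the last element
--     if len(each_list) > 0:
--         divided_lists.append(each_list)
--
--     return divided_lists
-- ===== SOURCE B (Python) =====
-- def divideNPLeaves(NP_leaves):
--     # Two-pointer run extraction: skip separator tags, slice out each maximal
--     # run of non-separator leaves.
--     res = []
--     i = 0
--     n = len(NP_leaves)
--     while i < n:
--         if NP_leaves[i][1] == 'CC' or NP_leaves[i][1] == 'IN':
--             i += 1
--             continue
--         j = i
--         while j < n and not (NP_leaves[j][1] == 'CC' or NP_leaves[j][1] == 'IN'):
--             j += 1
--         res.append(NP_leaves[i:j])
--         i = j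
--     return res
-- ===== Notes on version B (the rewrite author's own statement) =====
-- stated objective: alternative
-- what changed: Replaces A's element-by-element accumulator with flush-on-separator logic by a two-pointer scan that finds each maximal run of non-separator leaves and slices it out in one step.
import Mathlib
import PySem

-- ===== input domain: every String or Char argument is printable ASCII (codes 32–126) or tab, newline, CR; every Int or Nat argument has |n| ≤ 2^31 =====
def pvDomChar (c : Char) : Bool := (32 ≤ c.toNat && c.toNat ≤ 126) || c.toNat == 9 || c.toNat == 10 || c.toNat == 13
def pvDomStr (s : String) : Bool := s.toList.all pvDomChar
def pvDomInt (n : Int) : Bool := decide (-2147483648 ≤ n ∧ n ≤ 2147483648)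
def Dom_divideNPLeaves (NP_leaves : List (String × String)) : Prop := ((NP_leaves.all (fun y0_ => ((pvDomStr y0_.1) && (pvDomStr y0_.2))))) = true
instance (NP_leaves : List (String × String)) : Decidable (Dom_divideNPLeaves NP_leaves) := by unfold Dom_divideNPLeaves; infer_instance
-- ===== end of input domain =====

-- B replaces A's accumulate-and-flush loop with a two-pointer maximal-run extraction; alternative decomposition, same cost.

-- ===== PORT A =====
-- the loop over range(0, len(NP_leaves)) with state (divided_lists, each_list), plus the final flush
def divideNPLeavesGo : List (String × String) → List (List (String × String)) → List (String × String) → List (List (String × String))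
  | [], divided, each => if each.length > 0 then divided ++ [each] else divided
  | leaf :: rest, divided, each =>
    if leaf.2 = "CC" ∨ leaf.2 = "IN" then
      divideNPLeavesGo rest (if each.length > 0 then divided ++ [each] else divided) []
    else
      divideNPLeavesGo rest divided (each ++ [leaf])

def divideNPLeaves (NP_leaves : List (String × String)) : List (List (String × String)) :=
  divideNPLeavesGo NP_leaves [] []

-- ===== PORT B =====
-- not (leaf[1] == 'CC' or leaf[1] == 'IN')
def pvNonSep (leaf : String × String) : Bool := !(leaf.2 == "CC" || leaf.2 == "IN")

-- B's while loop: skip a separator, or slice out the maximal non-separator run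
-- (NP_leaves[i:j] with j the end of the run = takeWhile; continue from j = dropWhile)
def divideNPLeaves_alt : List (String × String) → List (List (String × String))
  | [] => []
  | leaf :: rest =>
    if pvNonSep leaf then
      (leaf :: rest.takeWhile pvNonSep) :: divideNPLeaves_alt (rest.dropWhile pvNonSep)
    else
      divideNPLeaves_alt rest
termination_by l => l.length
decreasing_by
  · exact Nat.lt_succ_of_le (List.length_dropWhile_le _ _)
  · exact Nat.lt_succ_self _

-- ===== PRECONDITION & SPEC =====
def Spec_divideNPLeaves (NP_leaves : List (String × String)) (out : List (List (String × String))) : Prop := out = divideNPLeaves_alt NP_leaves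
instance (NP_leaves : List (String × String)) (out : List (List (String × String))) : Decidable (Spec_divideNPLeaves NP_leaves out) := by unfold Spec_divideNPLeaves; infer_instance

-- ===== CLAIM (what is proved, stated in full; the proofs are below) =====
def Claim_equal_divideNPLeaves : Prop := ∀ (NP_leaves : List (String × String)), Dom_divideNPLeaves NP_leaves → Spec_divideNPLeaves NP_leaves (divideNPLeaves NP_leaves)

-- ===== LEMMAS AND PROOFS =====

-- the separator test of A (a Prop) and of B (a Bool) agree
theorem pvNonSep_iff (leaf : String × String) :
    pvNonSep leaf = true ↔ ¬(leaf.2 = "CC" ∨ leaf.2 = "IN") := by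
  simp [pvNonSep]

-- A's loop is a homomorphism in the divided_lists accumulator
theorem divideNPLeavesGo_append (xs : List (String × String)) :
    ∀ divided each, divideNPLeavesGo xs divided each = divided ++ divideNPLeavesGo xs [] each := by
  induction xs with
  | nil =>
    intro divided each
    simp only [divideNPLeavesGo]
    split_ifs <;> simp
  | cons x xs ih =>
    intro divided each
    simp only [divideNPLeavesGo]
    split_ifs with h1 h2
    · rw [ih, ih ([] ++ [each]), ← List.append_assoc]; simp
    · rw [ih, ih []]
    · rw [ih, ih []]

-- relating A's pending-accumulator state to B's run extraction
theorem divideNPLeavesGo_spec (xs : List (String × String)) :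
    (divideNPLeavesGo xs [] [] = divideNPLeaves_alt xs) ∧
    (∀ each : List (String × String), each ≠ [] →
      divideNPLeavesGo xs [] each
        = (each ++ xs.takeWhile pvNonSep) :: divideNPLeaves_alt (xs.dropWhile pvNonSep)) := by
  induction xs with
  | nil =>
    constructor
    · simp [divideNPLeavesGo, divideNPLeaves_alt]
    · intro each he
      simp [divideNPLeavesGo, divideNPLeaves_alt, List.length_pos_iff.mpr he]
  | cons x xs ih =>
    have hsep : (x.2 = "CC" ∨ x.2 = "IN") ↔ ¬(pvNonSep x = true) := by
      rw [pvNonSep_iff]; tauto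
    constructor
    · by_cases h : pvNonSep x = true
      · have h' : ¬(x.2 = "CC" ∨ x.2 = "IN") := (pvNonSep_iff x).mp h
        rw [divideNPLeaves_alt]
        simp only [divideNPLeavesGo, if_neg h', if_pos h, List.nil_append]
        exact ih.2 [x] (by simp)
      · have h' : x.2 = "CC" ∨ x.2 = "IN" := by tauto
        rw [divideNPLeaves_alt]
        simp only [divideNPLeavesGo, if_pos h', if_neg h, List.length_nil]
        simpa using ih.1
    · intro each he
      by_cases h : pvNonSep x = true
      · have h' : ¬(x.2 = "CC" ∨ x.2 = "IN") := (pvNonSep_iff x).mp h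
        simp only [divideNPLeavesGo, if_neg h', List.takeWhile_cons_of_pos h,
          List.dropWhile_cons_of_pos h]
        rw [ih.2 (each ++ [x]) (by simp), List.append_assoc]
        simp
      · have h' : x.2 = "CC" ∨ x.2 = "IN" := by tauto
        simp only [divideNPLeavesGo, if_pos h', List.length_pos_iff.mpr he, if_pos,
          List.takeWhile_cons_of_neg (by simpa using h), List.dropWhile_cons_of_neg (by simpa using h)]
        rw [divideNPLeavesGo_append, ih.1, divideNPLeaves_alt, if_neg h]
        simp

-- ===== VERDICT (by name: the statement is the Claim_ definition above) =====
theorem divideNPLeaves_spec : Claim_equal_divideNPLeaves := by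
  intro NP_leaves _
  unfold Spec_divideNPLeaves divideNPLeaves
  exact (divideNPLeavesGo_spec NP_leaves).1
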